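-- pv_equiv track=rewrite | github.com/mazerunner70/housef3 | backend/src/services/category_rule_engine.py | _get_regex_suggestions
-- ===== SOURCE A (Python) =====
-- from typing import Dict, List, Optional, Tuple, Any
--
-- def _get_regex_suggestions(pattern: str, error_msg: str) -> List[str]:
--     """Provide suggestions for fixing common regex errors"""
--
--     suggestions = []
--
--     # Common regex fixes
--     if "Unbalanced parenthesis" in error_msg or "unbalanced parenthesis" in error_msg:
--         suggestions.append("Check that all opening parentheses '(' have matching closing ')' parentheses")
--
--     if "Invalid character range" in error_msg:
--         suggestions.append("Check character ranges in square brackets, e.g., [a-z] not [z-a]")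
--
--     if "Nothing to repeat" in error_msg:
--         suggestions.append("Remove quantifiers (*,+,?) that don't follow a character or group")
--
--     # Special characters that need escaping
--     special_chars = set("()[]{}*+?.^$|\\")
--     unescaped_special = [char for char in pattern if char in special_chars and f"\\{char}" not in pattern]
--
--     if unescaped_special:
--         suggestions.append(f"Consider escaping special characters: {', '.join(unescaped_special)}")
--
--     if not suggestions:
--         suggestions.append("Try a simpler pattern or use 'contains' matching instead of regex")
--
--     return suggestions
-- ===== SOURCE B (Python) =====
-- from typing import List
--
-- # Table of (trigger substrings, message) rules plus one stateful pass over the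
-- # pattern that simultaneously collects escaped characters and special-character
-- # occurrences; A instead uses an if-chain and a per-character substring re-scan.
-- _MESSAGE_RULES = [
--     (["Unbalanced parenthesis", "unbalanced parenthesis"],
--      "Check that all opening parentheses '(' have matching closing ')' parentheses"),
--     (["Invalid character range"],
--      "Check character ranges in square brackets, e.g., [a-z] not [z-a]"),
--     (["Nothing to repeat"],
--      "Remove quantifiers (*,+,?) that don't follow a character or group"),
-- ]
--
--
-- def _get_regex_suggestions(pattern: str, error_msg: str) -> List[str]:
--     """Provide suggestions for fixing common regex errors (table + single pass)."""
--
--     suggestions = [msg for keys, msg in _MESSAGE_RULES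
--                    if any(k in error_msg for k in keys)]
--
--     special_chars = set("()[]{}*+?.^$|\\")
--     escaped = set()
--     specials = []
--     prev_backslash = False
--     for ch in pattern:
--         if prev_backslash:
--             escaped.add(ch)
--         if ch in special_chars:
--             specials.append(ch)
--         prev_backslash = ch == "\\"
--
--     unescaped_special = [c for c in specials if c not in escaped]
--     if unescaped_special:
--         suggestions.append("Consider escaping special characters: " + ", ".join(unescaped_special))
--
--     if not suggestions:
--         suggestions.append("Try a simpler pattern or use 'contains' matching instead of regex")
--
--     return suggestions
-- ===== Notes on version B (the rewrite author's own statement) =====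
-- stated objective: alternative
-- what changed: B replaces A's if-chain plus quadratic per-character substring re-scan by a data-driven rule table for the error messages and one stateful pass over the pattern that simultaneously collects the escaped-character set and the special-character occurrences, filtering the latter by the former.
import Mathlib
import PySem

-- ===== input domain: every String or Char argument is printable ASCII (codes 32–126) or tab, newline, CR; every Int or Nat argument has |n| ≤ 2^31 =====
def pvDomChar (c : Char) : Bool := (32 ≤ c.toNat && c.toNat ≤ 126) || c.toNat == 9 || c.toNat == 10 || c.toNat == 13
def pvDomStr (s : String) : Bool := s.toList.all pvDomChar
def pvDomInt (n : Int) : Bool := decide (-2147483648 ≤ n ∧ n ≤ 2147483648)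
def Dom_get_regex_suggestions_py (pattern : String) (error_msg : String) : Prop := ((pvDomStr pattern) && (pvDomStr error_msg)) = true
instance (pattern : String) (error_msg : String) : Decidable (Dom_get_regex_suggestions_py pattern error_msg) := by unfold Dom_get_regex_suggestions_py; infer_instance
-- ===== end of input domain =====

-- B replaces A's if-chain and quadratic per-char substring re-scan by a rule table for the
-- messages and one stateful pass collecting escaped chars and special occurrences (objective: alternative).

-- ===== PORT A =====
-- literal transliteration of A: each `if` appends to the suggestions accumulator;
-- the per-char test re-scans the whole pattern for the substring "\c".
def get_regex_suggestions_py (pattern : String) (error_msg : String) : List String :=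
  let s1 : List String :=
    if PySem.Str.isIn "Unbalanced parenthesis" error_msg ||
       PySem.Str.isIn "unbalanced parenthesis" error_msg then
      ["Check that all opening parentheses '(' have matching closing ')' parentheses"]
    else []
  let s2 : List String :=
    if PySem.Str.isIn "Invalid character range" error_msg then
      s1 ++ ["Check character ranges in square brackets, e.g., [a-z] not [z-a]"]
    else s1
  let s3 : List String :=
    if PySem.Str.isIn "Nothing to repeat" error_msg then
      s2 ++ ["Remove quantifiers (*,+,?) that don't follow a character or group"]
    else s2
  let special_chars : List Char := PySem.Set.ofList "()[]{}*+?.^$|\\".toList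
  let unescaped_special : List Char :=
    pattern.toList.filter (fun c =>
      PySem.Set.contains special_chars c &&
      !(PySem.Chars.isIn ['\\', c] pattern.toList))
  let s4 : List String :=
    if unescaped_special ≠ [] then
      s3 ++ ["Consider escaping special characters: " ++
             PySem.Str.join ", " (unescaped_special.map (fun c => String.mk [c]))]
    else s3
  if s4 = [] then
    ["Try a simpler pattern or use 'contains' matching instead of regex"]
  else s4

-- ===== PORT B =====
-- B's module-level rule table _MESSAGE_RULES
def pvMessageRules : List (List String × String) :=
  [ (["Unbalanced parenthesis", "unbalanced parenthesis"],
     "Check that all opening parentheses '(' have matching closing ')' parentheses"),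
    (["Invalid character range"],
     "Check character ranges in square brackets, e.g., [a-z] not [z-a]"),
    (["Nothing to repeat"],
     "Remove quantifiers (*,+,?) that don't follow a character or group") ]

-- literal transliteration of B: the message comprehension over the rule table, then one
-- foldl over the pattern with state (escaped set, specials so far, prev char was backslash).
def get_regex_suggestions_py_alt (pattern : String) (error_msg : String) : List String :=
  let suggestions : List String :=
    (pvMessageRules.filter (fun r => r.1.any (fun k => PySem.Str.isIn k error_msg))).map Prod.snd
  let special_chars : List Char := PySem.Set.ofList "()[]{}*+?.^$|\\".toList
  let st : PySem.Set Char × List Char × Bool :=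
    pattern.toList.foldl (fun st ch =>
      let esc := if st.2.2 then PySem.Set.add st.1 ch else st.1
      let sp := if PySem.Set.contains special_chars ch then st.2.1 ++ [ch] else st.2.1
      (esc, sp, ch == '\\')) (PySem.Set.empty, [], false)
  let unescaped_special : List Char :=
    st.2.1.filter (fun c => !(PySem.Set.contains st.1 c))
  let s2 : List String :=
    if unescaped_special ≠ [] then
      suggestions ++ ["Consider escaping special characters: " ++
             PySem.Str.join ", " (unescaped_special.map (fun c => String.mk [c]))]
    else suggestions
  if s2 = [] then
    ["Try a simpler pattern or use 'contains' matching instead of regex"]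
  else s2

-- ===== PRECONDITION & SPEC =====
def Spec_get_regex_suggestions_py (pattern : String) (error_msg : String) (out : List String) : Prop := out = get_regex_suggestions_py_alt pattern error_msg
instance (pattern : String) (error_msg : String) (out : List String) : Decidable (Spec_get_regex_suggestions_py pattern error_msg out) := by unfold Spec_get_regex_suggestions_py; infer_instance

-- ===== CLAIM (what is proved, stated in full; the proofs are below) =====
def Claim_equal_get_regex_suggestions_py : Prop := ∀ (pattern : String) (error_msg : String), Dom_get_regex_suggestions_py pattern error_msg → Spec_get_regex_suggestions_py pattern error_msg (get_regex_suggestions_py pattern error_msg)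

-- ===== LEMMAS AND PROOFS =====

-- spec function for the escaped-set contents of B's fold: chars following a backslash
def pvEscList : Bool → List Char → List Char
  | _, [] => []
  | prev, ch :: rest => (if prev then [ch] else []) ++ pvEscList (ch == '\\') rest

theorem singleton_prefix_iff_head? {α : Type} (c : α) (xs : List α) :
    [c] <+: xs ↔ xs.head? = some c := by
  cases xs with
  | nil => simp
  | cons y t => simp [List.cons_prefix_cons, eq_comm]

theorem mem_pvEscList_iff (c : Char) :
    ∀ (L : List Char) (prev : Bool),
      c ∈ pvEscList prev L ↔ ((prev = true ∧ L.head? = some c) ∨ ['\\', c] <:+: L) := by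
  intro L
  induction L with
  | nil =>
    intro prev
    simp only [pvEscList, List.not_mem_nil, false_iff]
    rintro (⟨_, h⟩ | h)
    · simp at h
    · have := h.length_le; simp at this
  | cons x xs ih =>
    intro prev
    simp only [pvEscList, List.mem_append, List.infix_cons_iff, List.cons_prefix_cons,
      singleton_prefix_iff_head?, ih, List.head?_cons, Option.some.injEq]
    cases prev
    · simp [eq_comm (a := x)]
    · simp [eq_comm (a := x)]

-- B's fold characterised: escaped set ~ pvEscList, specials = filter, flag = last char is '\'
theorem foldB_spec (special_chars : List Char) :
    ∀ (L : List Char) (esc sp : List Char) (prev : Bool),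
      (∀ c, c ∈ (L.foldl (fun st ch =>
          let e := if st.2.2 then PySem.Set.add st.1 ch else st.1
          let s := if PySem.Set.contains special_chars ch then st.2.1 ++ [ch] else st.2.1
          (e, s, ch == '\\')) (esc, sp, prev)).1 ↔ c ∈ esc ∨ c ∈ pvEscList prev L) ∧
      (L.foldl (fun st ch =>
          let e := if st.2.2 then PySem.Set.add st.1 ch else st.1
          let s := if PySem.Set.contains special_chars ch then st.2.1 ++ [ch] else st.2.1
          (e, s, ch == '\\')) (esc, sp, prev)).2.1 =
        sp ++ L.filter (fun c => PySem.Set.contains special_chars c) := by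
  intro L
  induction L with
  | nil => intro esc sp prev; simp [pvEscList]
  | cons x xs ih =>
    intro esc sp prev
    simp only [List.foldl_cons, List.filter_cons]
    obtain ⟨ih1, ih2⟩ := ih (if prev then PySem.Set.add esc x else esc)
      (if PySem.Set.contains special_chars x then sp ++ [x] else sp) (x == '\\')
    constructor
    · intro c
      rw [ih1]
      cases prev
      · simp [pvEscList]
      · simp [pvEscList, PySem.Set.mem_add, or_assoc]
    · rw [ih2]
      split_ifs <;> simp

-- pointwise: A's substring test equals membership in B's final escaped set
theorem filter_eq_filter (special_chars : List Char) (L : List Char) :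
    L.filter (fun c => PySem.Set.contains special_chars c &&
        !(PySem.Chars.isIn ['\\', c] L)) =
      (L.foldl (fun st ch =>
          let e := if st.2.2 then PySem.Set.add st.1 ch else st.1
          let s := if PySem.Set.contains special_chars ch then st.2.1 ++ [ch] else st.2.1
          (e, s, ch == '\\')) ((PySem.Set.empty : PySem.Set Char), [], false)).2.1.filter
        (fun c => !(PySem.Set.contains
          (L.foldl (fun st ch =>
            let e := if st.2.2 then PySem.Set.add st.1 ch else st.1
            let s := if PySem.Set.contains special_chars ch then st.2.1 ++ [ch] else st.2.1
            (e, s, ch == '\\')) ((PySem.Set.empty : PySem.Set Char), [], false)).1 c)) := by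
  obtain ⟨h1, h2⟩ := foldB_spec special_chars L PySem.Set.empty [] false
  rw [h2]
  simp only [List.nil_append]
  rw [List.filter_filter]
  apply List.filter_congr
  intro c _
  have hc : PySem.Chars.isIn ['\\', c] L = PySem.Set.contains
      (L.foldl (fun st ch =>
        let e := if st.2.2 then PySem.Set.add st.1 ch else st.1
        let s := if PySem.Set.contains special_chars ch then st.2.1 ++ [ch] else st.2.1
        (e, s, ch == '\\')) ((PySem.Set.empty : PySem.Set Char), [], false)).1 c := by
    rw [Bool.eq_iff_iff, PySem.Chars.isIn_iff_infix, PySem.Set.contains_iff, h1,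
        mem_pvEscList_iff]
    simp [PySem.Set.empty]
  rw [hc, Bool.and_comm]

-- the three-rule table comprehension equals A's if-chain of appends
theorem rules_eq (error_msg : String) :
    ((pvMessageRules.filter (fun r => r.1.any (fun k => PySem.Str.isIn k error_msg))).map
        Prod.snd) =
      (let s1 : List String :=
        if PySem.Str.isIn "Unbalanced parenthesis" error_msg ||
           PySem.Str.isIn "unbalanced parenthesis" error_msg then
          ["Check that all opening parentheses '(' have matching closing ')' parentheses"]
        else []
      let s2 : List String :=
        if PySem.Str.isIn "Invalid character range" error_msg then
          s1 ++ ["Check character ranges in square brackets, e.g., [a-z] not [z-a]"]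
        else s1
      if PySem.Str.isIn "Nothing to repeat" error_msg then
        s2 ++ ["Remove quantifiers (*,+,?) that don't follow a character or group"]
      else s2) := by
  simp only [pvMessageRules, List.filter_cons, List.filter_nil, List.any_cons, List.any_nil,
    Bool.or_false]
  split_ifs <;> simp_all

-- ===== VERDICT (by name: the statement is the Claim_ definition above) =====
theorem get_regex_suggestions_py_spec : Claim_equal_get_regex_suggestions_py := by
  intro pattern error_msg _
  unfold Spec_get_regex_suggestions_py get_regex_suggestions_py get_regex_suggestions_py_alt
  simp only [rules_eq error_msg, filter_eq_filter]
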